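-- pv_equiv track=rewrite | github.com/vibheksoni/quickcontext | engine/sdk.py | _symbol_helper_mismatch_penalty
-- ===== SOURCE A (Python) =====
-- def _symbol_helper_mismatch_penalty(candidate_tokens: set[str], query_keywords: set[str]) -> int:
--     specialized_groups = {
--         "rerank": ({"rerank", "blend"}, 2),
--         "embedding": ({"embed", "embedding", "cached", "cache"}, 2),
--         "limit": ({"limit", "request", "requests", "threshold", "budget"}, 1),
--         "keyword": ({"keyword", "keywords"}, 1),
--         "postprocess": ({"finalize", "final", "diversify", "hydrate", "hydration", "postprocess"}, 2),
--         "legacy": ({"legacy"}, 2),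
--     }
--     penalty = 0
--     for terms, weight in specialized_groups.values():
--         if not candidate_tokens.intersection(terms):
--             continue
--         if query_keywords.intersection(terms):
--             continue
--         penalty += weight
--     return penalty
-- ===== SOURCE B (Python) =====
-- def _symbol_helper_mismatch_penalty(candidate_tokens: set[str], query_keywords: set[str]) -> int:
--     group_weights = {
--         "rerank": 2,
--         "embedding": 2,
--         "limit": 1,
--         "keyword": 1,
--         "postprocess": 2,
--         "legacy": 2,
--     }
--     term_group = {
--         "rerank": "rerank", "blend": "rerank",
--         "embed": "embedding", "embedding": "embedding", "cached": "embedding", "cache": "embedding",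
--         "limit": "limit", "request": "limit", "requests": "limit", "threshold": "limit", "budget": "limit",
--         "keyword": "keyword", "keywords": "keyword",
--         "finalize": "postprocess", "final": "postprocess", "diversify": "postprocess",
--         "hydrate": "postprocess", "hydration": "postprocess", "postprocess": "postprocess",
--         "legacy": "legacy",
--     }
--     cand_groups = {term_group[t] for t in candidate_tokens if t in term_group}
--     query_groups = {term_group[t] for t in query_keywords if t in term_group}
--     return sum(w for g, w in group_weights.items()
--                if g in cand_groups and g not in query_groups)
-- ===== Notes on version B (the rewrite author's own statement) =====
-- stated objective: alternative
-- what changed: Replaces the per-group pairwise set intersections with a precomputed term-to-group index: each input token set is mapped once through the index into a set of triggered group names, and the penalty is read off as the weights of groups hit by the candidate but not the query.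
import Mathlib
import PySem

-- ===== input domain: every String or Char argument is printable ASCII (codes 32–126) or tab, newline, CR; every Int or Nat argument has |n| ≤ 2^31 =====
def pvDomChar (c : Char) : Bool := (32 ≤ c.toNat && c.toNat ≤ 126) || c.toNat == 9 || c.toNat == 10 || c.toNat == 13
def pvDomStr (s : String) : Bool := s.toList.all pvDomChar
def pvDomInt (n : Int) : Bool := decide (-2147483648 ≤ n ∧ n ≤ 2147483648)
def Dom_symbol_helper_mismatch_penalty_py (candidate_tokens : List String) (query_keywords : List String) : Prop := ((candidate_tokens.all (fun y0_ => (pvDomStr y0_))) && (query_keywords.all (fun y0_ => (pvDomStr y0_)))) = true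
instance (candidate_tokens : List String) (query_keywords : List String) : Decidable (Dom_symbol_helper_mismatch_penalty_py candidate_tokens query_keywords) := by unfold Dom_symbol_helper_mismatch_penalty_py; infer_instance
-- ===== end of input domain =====

-- B replaces A's per-group pairwise intersections by a term→group index that the two
-- token sets are mapped through once; same results, similar cost (objective: alternative).

-- ===== PORT A =====
-- the values() of A's specialized_groups dict, in insertion order (term sets kept as lists; A only uses membership)
def pvGroupsA : List (List String × Int) :=
  [(["rerank", "blend"], 2),
   (["embed", "embedding", "cached", "cache"], 2),
   (["limit", "request", "requests", "threshold", "budget"], 1),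
   (["keyword", "keywords"], 1),
   (["finalize", "final", "diversify", "hydrate", "hydration", "postprocess"], 2),
   (["legacy"], 2)]

-- 'not s.intersection(terms)' is ported as the emptiness test 'no token of s lies in terms'
def symbol_helper_mismatch_penalty_py (candidate_tokens : List String) (query_keywords : List String) : Int :=
  pvGroupsA.foldl
    (fun penalty tw =>
      if !(candidate_tokens.any (fun t => tw.1.contains t)) then penalty
      else if query_keywords.any (fun t => tw.1.contains t) then penalty
      else penalty + tw.2)
    0

-- ===== PORT B =====
def pvGroupWeights : List (String × Int) :=
  [("rerank", 2), ("embedding", 2), ("limit", 1), ("keyword", 1), ("postprocess", 2), ("legacy", 2)]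

-- Source B's term_group dict literal (distinct keys), as the literal association list
def pvTermGroup : PySem.Dict String String :=
  PySem.Dict.mk
    [("rerank", "rerank"), ("blend", "rerank"),
     ("embed", "embedding"), ("embedding", "embedding"), ("cached", "embedding"), ("cache", "embedding"),
     ("limit", "limit"), ("request", "limit"), ("requests", "limit"), ("threshold", "limit"), ("budget", "limit"),
     ("keyword", "keyword"), ("keywords", "keyword"),
     ("finalize", "postprocess"), ("final", "postprocess"), ("diversify", "postprocess"),
     ("hydrate", "postprocess"), ("hydration", "postprocess"), ("postprocess", "postprocess"),
     ("legacy", "legacy")]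

-- {term_group[t] for t in tokens if t in term_group}
def pvGroupsOf (tokens : List String) : PySem.Set String :=
  tokens.foldl
    (fun s t =>
      match PySem.Dict.get? pvTermGroup t with
      | some g => PySem.Set.add s g
      | none => s)
    PySem.Set.empty

def symbol_helper_mismatch_penalty_py_alt (candidate_tokens : List String) (query_keywords : List String) : Int :=
  let cand_groups := pvGroupsOf candidate_tokens
  let query_groups := pvGroupsOf query_keywords
  pvGroupWeights.foldl
    (fun acc gw =>
      if PySem.Set.contains cand_groups gw.1 && !(PySem.Set.contains query_groups gw.1) then acc + gw.2
      else acc)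
    0

-- ===== PRECONDITION & SPEC =====
def Spec_symbol_helper_mismatch_penalty_py (candidate_tokens : List String) (query_keywords : List String) (out : Int) : Prop := out = symbol_helper_mismatch_penalty_py_alt candidate_tokens query_keywords
instance (candidate_tokens : List String) (query_keywords : List String) (out : Int) : Decidable (Spec_symbol_helper_mismatch_penalty_py candidate_tokens query_keywords out) := by unfold Spec_symbol_helper_mismatch_penalty_py; infer_instance

-- ===== CLAIM (what is proved, stated in full; the proofs are below) =====
def Claim_equal_symbol_helper_mismatch_penalty_py : Prop := ∀ (candidate_tokens : List String) (query_keywords : List String), Dom_symbol_helper_mismatch_penalty_py candidate_tokens query_keywords → Spec_symbol_helper_mismatch_penalty_py candidate_tokens query_keywords (symbol_helper_mismatch_penalty_py candidate_tokens query_keywords)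

-- ===== LEMMAS AND PROOFS =====

-- membership in the group set built by pvGroupsOf
theorem mem_foldl_add (f : String → Option String) (c : List String) (init : List String) (g : String) :
    (g ∈ c.foldl (fun s t => match f t with | some x => PySem.Set.add s x | none => s) init) ↔
      g ∈ init ∨ ∃ t ∈ c, f t = some g := by
  induction c generalizing init with
  | nil => simp
  | cons h tl ih =>
    simp only [List.foldl_cons, ih, List.mem_cons]
    cases hf : f h with
    | none =>

      constructor
      · rintro (hg | ⟨t, ht, hft⟩)
        · exact Or.inl hg
        · exact Or.inr ⟨t, Or.inr ht, hft⟩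
      · rintro (hg | ⟨t, (rfl | ht), hft⟩)
        · exact Or.inl hg
        · rw [hf] at hft; exact absurd hft (by simp)
        · exact Or.inr ⟨t, ht, hft⟩
    | some x =>
      simp only [PySem.Set.mem_add]
      constructor
      · rintro (⟨hg | rfl⟩ | ⟨t, ht, hft⟩)
        · exact Or.inl hg
        · exact Or.inr ⟨h, Or.inl rfl, hf⟩
        · exact Or.inr ⟨t, Or.inr ht, hft⟩
      · rintro (hg | ⟨t, (rfl | ht), hft⟩)
        · exact Or.inl (Or.inl hg)
        · rw [hf] at hft; exact Or.inl (Or.inr (Eq.symm (Option.some_injective _ hft)))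
        · exact Or.inr ⟨t, ht, hft⟩

theorem mem_pvGroupsOf (tokens : List String) (g : String) :
    (g ∈ pvGroupsOf tokens) ↔ ∃ t ∈ tokens, PySem.Dict.get? pvTermGroup t = some g := by
  simpa [pvGroupsOf, PySem.Set.empty] using
    mem_foldl_add (fun t => PySem.Dict.get? pvTermGroup t) tokens [] g

-- first-match lookup in an association list with distinct keys is list membership of the pair
theorem get?_mk_eq_some_iff (l : List (String × String)) (t g : String)
    (hnd : (l.map Prod.fst).Nodup) :
    PySem.Dict.get? (PySem.Dict.mk l) t = some g ↔ (t, g) ∈ l := by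
  induction l with
  | nil => simp [PySem.Dict.get?]
  | cons p rest ih =>
    obtain ⟨k, v⟩ := p
    simp only [List.map_cons, List.nodup_cons] at hnd
    rw [PySem.Dict.get?_mk_cons]
    by_cases hk : k = t
    · subst hk
      simp only [if_pos (beq_self_eq_true k), List.mem_cons, Prod.mk.injEq, true_and]
      constructor
      · intro h; exact Or.inl (Eq.symm (Option.some_injective _ h))
      · rintro (rfl | hmem)
        · rfl
        · exact absurd (List.mem_map.mpr ⟨(k, g), hmem, rfl⟩) hnd.1
    · rw [if_neg (by simpa using hk), ih hnd.2]
      constructor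
      · intro h; exact List.mem_cons_of_mem _ h
      · intro h
        rcases List.mem_cons.mp h with h1 | h1
        · exact absurd (congrArg Prod.fst h1).symm hk
        · exact h1

-- the group set contains group g iff some token lies in g's term list
theorem contains_pvGroupsOf (tokens : List String) (g : String) (terms : List String)
    (hchar : ∀ t : String, PySem.Dict.get? pvTermGroup t = some g ↔ t ∈ terms) :
    PySem.Set.contains (pvGroupsOf tokens) g = tokens.any (fun t => terms.contains t) := by
  rw [Bool.eq_iff_iff, PySem.Set.contains_iff, mem_pvGroupsOf, List.any_eq_true]
  constructor
  · rintro ⟨t, ht, hs⟩; exact ⟨t, ht, by simpa using (hchar t).mp hs⟩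
  · rintro ⟨t, ht, hs⟩; exact ⟨t, ht, (hchar t).mpr (by simpa using hs)⟩

-- per-group characterisation of the index
theorem char_rerank (t : String) :
    PySem.Dict.get? pvTermGroup t = some "rerank" ↔ t ∈ (["rerank", "blend"] : List String) := by
  rw [pvTermGroup, get?_mk_eq_some_iff _ _ _ (by decide)]; simp [Prod.mk.injEq]

theorem char_embedding (t : String) :
    PySem.Dict.get? pvTermGroup t = some "embedding" ↔ t ∈ (["embed", "embedding", "cached", "cache"] : List String) := by
  rw [pvTermGroup, get?_mk_eq_some_iff _ _ _ (by decide)]; simp [Prod.mk.injEq]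

theorem char_limit (t : String) :
    PySem.Dict.get? pvTermGroup t = some "limit" ↔ t ∈ (["limit", "request", "requests", "threshold", "budget"] : List String) := by
  rw [pvTermGroup, get?_mk_eq_some_iff _ _ _ (by decide)]; simp [Prod.mk.injEq]

theorem char_keyword (t : String) :
    PySem.Dict.get? pvTermGroup t = some "keyword" ↔ t ∈ (["keyword", "keywords"] : List String) := by
  rw [pvTermGroup, get?_mk_eq_some_iff _ _ _ (by decide)]; simp [Prod.mk.injEq]

theorem char_postprocess (t : String) :
    PySem.Dict.get? pvTermGroup t = some "postprocess" ↔ t ∈ (["finalize", "final", "diversify", "hydrate", "hydration", "postprocess"] : List String) := by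
  rw [pvTermGroup, get?_mk_eq_some_iff _ _ _ (by decide)]; simp [Prod.mk.injEq]

theorem char_legacy (t : String) :
    PySem.Dict.get? pvTermGroup t = some "legacy" ↔ t ∈ (["legacy"] : List String) := by
  rw [pvTermGroup, get?_mk_eq_some_iff _ _ _ (by decide)]; simp [Prod.mk.injEq]

-- A's step shape equals B's step shape for matching Boolean conditions
theorem step_shape (a b : Bool) (acc w : Int) :
    (if !a then acc else if b then acc else acc + w) = (if a && !b then acc + w else acc) := by
  cases a <;> cases b <;> simp

theorem symbol_helper_mismatch_penalty_py_spec : Claim_equal_symbol_helper_mismatch_penalty_py := by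
  intro c q _
  unfold Spec_symbol_helper_mismatch_penalty_py
  unfold symbol_helper_mismatch_penalty_py symbol_helper_mismatch_penalty_py_alt
  simp only [pvGroupsA, pvGroupWeights, List.foldl_cons, List.foldl_nil, step_shape,
    contains_pvGroupsOf c "rerank" _ char_rerank,
    contains_pvGroupsOf c "embedding" _ char_embedding,
    contains_pvGroupsOf c "limit" _ char_limit,
    contains_pvGroupsOf c "keyword" _ char_keyword,
    contains_pvGroupsOf c "postprocess" _ char_postprocess,
    contains_pvGroupsOf c "legacy" _ char_legacy,
    contains_pvGroupsOf q "rerank" _ char_rerank,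
    contains_pvGroupsOf q "embedding" _ char_embedding,
    contains_pvGroupsOf q "limit" _ char_limit,
    contains_pvGroupsOf q "keyword" _ char_keyword,
    contains_pvGroupsOf q "postprocess" _ char_postprocess,
    contains_pvGroupsOf q "legacy" _ char_legacy]
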